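-- pv_equiv track=rewrite | github.com/paliwodam/Algorithms-and-Data-Structures | Sortowania/RadixSort digits.py | getMaxLengh
-- ===== SOURCE A (Python) =====
-- def getMaxLengh(T):
--     max_n = 0
--     for i in T:
--         if i > max_n:
--             max_n = i
--
--     max_l = 0
--     while max_n > 0:
--         max_n //= 10
--         max_l += 1
--     return max_l
-- ===== SOURCE B (Python) =====
-- def getMaxLengh(T):
--     # Per-element digit counting: take the max of the decimal lengths of the
--     # positive elements (digit length is monotone, so this equals the digit
--     # length of the maximum); empty / all-nonpositive input gives 0.
--     return max((len(str(x)) for x in T if x > 0), default=0)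
-- ===== Notes on version B (the rewrite author's own statement) =====
-- stated objective: simpler
-- what changed: Instead of A's two staged loops (running max of the values, then a repeated-division digit count of that max), B never computes the maximum value at all: it counts the decimal-string length of each positive element and returns the maximum of those lengths (default 0), correct because digit length is monotone.
import Mathlib
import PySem

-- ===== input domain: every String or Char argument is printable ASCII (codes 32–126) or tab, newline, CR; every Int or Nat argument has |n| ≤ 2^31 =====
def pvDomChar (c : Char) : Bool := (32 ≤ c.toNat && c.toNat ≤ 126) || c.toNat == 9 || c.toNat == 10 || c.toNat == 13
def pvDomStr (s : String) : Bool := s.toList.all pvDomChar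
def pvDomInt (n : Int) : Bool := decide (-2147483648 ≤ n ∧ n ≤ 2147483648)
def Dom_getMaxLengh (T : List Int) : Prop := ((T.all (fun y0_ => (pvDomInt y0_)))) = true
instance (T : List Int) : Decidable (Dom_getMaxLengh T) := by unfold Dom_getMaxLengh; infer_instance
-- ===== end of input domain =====

-- B avoids A's two staged loops (running max, then repeated-division digit count of the max):
-- it takes the max of the per-element decimal-string lengths of the positive elements
-- (digit length is monotone, so it agrees); objective: simpler.

-- ===== PORT A =====
-- the 'while max_n > 0: max_n //= 10; max_l += 1' loop of A
def pvDigitLoop (n l : Int) : Int :=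
  if n > 0 then pvDigitLoop (PySem.Int.floordiv n 10) (l + 1) else l
termination_by n.toNat
decreasing_by
  rename_i h
  rw [PySem.Int.floordiv_eq_ediv_of_pos (by omega)]
  omega

def getMaxLengh (T : List Int) : Int :=
  let max_n := T.foldl (fun m i => if i > m then i else m) 0
  pvDigitLoop max_n 0

-- ===== PORT B =====
def getMaxLengh_alt (T : List Int) : Int :=
  PySem.List.maxD
    ((T.filter (fun x => decide (x > 0))).map (fun x => PySem.Str.len (PySem.Int.toStr x)))
    (fun y => y) 0

-- ===== PRECONDITION & SPEC =====
def Spec_getMaxLengh (T : List Int) (out : Int) : Prop := out = getMaxLengh_alt T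
instance (T : List Int) (out : Int) : Decidable (Spec_getMaxLengh T out) := by unfold Spec_getMaxLengh; infer_instance

-- ===== CLAIM =====
def Claim_equal_getMaxLengh : Prop := ∀ (T : List Int), Dom_getMaxLengh T → Spec_getMaxLengh T (getMaxLengh T)

-- ===== LEMMAS AND PROOFS =====

-- abstract digit count on Nat
def pvCountDigits (n : Nat) : Nat :=
  if h : n = 0 then 0 else pvCountDigits (n / 10) + 1
termination_by n
decreasing_by exact Nat.div_lt_self (Nat.pos_of_ne_zero h) (by omega)

lemma pvCountDigits_zero : pvCountDigits 0 = 0 := by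
  unfold pvCountDigits; simp

lemma pvCountDigits_pos {n : Nat} (h : n ≠ 0) :
    pvCountDigits n = pvCountDigits (n / 10) + 1 := by
  conv_lhs => unfold pvCountDigits
  simp [h]

lemma pvCountDigits_pos_ge {n : Nat} (h : n ≠ 0) : 1 ≤ pvCountDigits n := by
  rw [pvCountDigits_pos h]; omega

lemma pvCountDigits_mono : Monotone pvCountDigits := by
  intro a b hab
  induction b using Nat.strong_induction_on generalizing a with
  | _ b ih =>
    by_cases ha : a = 0
    · subst ha; rw [pvCountDigits_zero]; omega
    · have hb : b ≠ 0 := by omega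
      rw [pvCountDigits_pos ha, pvCountDigits_pos hb]
      have := ih (b / 10) (Nat.div_lt_self (by omega) (by omega)) (Nat.div_le_div_right hab)
      omega

lemma pvCountDigits_max (a b : Nat) :
    pvCountDigits (max a b) = max (pvCountDigits a) (pvCountDigits b) :=
  pvCountDigits_mono.map_max

lemma pvDigitLoop_natCast (n : Nat) : ∀ l : Int, pvDigitLoop (n : Int) l = l + pvCountDigits n := by
  induction n using Nat.strong_induction_on with
  | _ n ih =>
    intro l
    unfold pvDigitLoop
    by_cases h : 0 < n
    · have hd : PySem.Int.floordiv (n : Int) 10 = ((n / 10 : Nat) : Int) := by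
        exact_mod_cast PySem.Int.floordiv_natCast n 10
      rw [if_pos (by exact_mod_cast h), hd,
        ih (n / 10) (Nat.div_lt_self h (by omega)) (l + 1),
        pvCountDigits_pos (show n ≠ 0 by omega)]
      push_cast; ring
    · have hn : n = 0 := by omega
      subst hn
      simp [pvCountDigits_zero]

lemma pvToDigitsCore_length (f : Nat) : ∀ (n : Nat) (acc : List Char), n < 10 ^ f → 0 < f →
    (Nat.toDigitsCore 10 f n acc).length = max 1 (pvCountDigits n) + acc.length := by
  induction f with
  | zero => intro n acc _ hf; omega
  | succ f ih =>
    intro n acc hn _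
    simp only [Nat.toDigitsCore]
    by_cases h : n / 10 = 0
    · rw [if_pos h]
      have hlt : n < 10 := by omega
      have : max 1 (pvCountDigits n) = 1 := by
        by_cases h0 : n = 0
        · subst h0; rw [pvCountDigits_zero]; omega
        · rw [pvCountDigits_pos h0, h, pvCountDigits_zero]; omega
      simp [this]; omega
    · rw [if_neg h]
      have hf : 0 < f := by
        by_contra hf0
        have : f = 0 := by omega
        subst this
        simp at hn
        omega
      have hdiv : n / 10 < 10 ^ f := by
        exact (Nat.div_lt_iff_lt_mul (by omega : 0 < 10)).mpr
          (by rw [pow_succ] at hn; exact hn)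
      rw [ih (n / 10) _ hdiv hf]
      have h1 := pvCountDigits_pos_ge h
      have hn0 : n ≠ 0 := by omega
      rw [pvCountDigits_pos hn0]
      simp only [List.length_cons]
      omega

lemma pvToDigits_length {n : Nat} (h : n ≠ 0) :
    (Nat.toDigits 10 n).length = pvCountDigits n := by
  have hlt : n < 10 ^ (n + 1) :=
    lt_of_lt_of_le (Nat.lt_pow_self (by omega)) (Nat.pow_le_pow_right (by omega) (by omega))
  have := pvToDigitsCore_length (n + 1) n [] hlt (by omega)
  simp only [Nat.toDigits] at *
  rw [this, Nat.max_eq_right (pvCountDigits_pos_ge h)]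
  simp

lemma pvStrLen_toStr_natCast {k : Nat} (h : k ≠ 0) :
    PySem.Str.len (PySem.Int.toStr (k : Int)) = (pvCountDigits k : Int) := by
  unfold PySem.Str.len
  rw [PySem.Int.toList_toStr]
  unfold PySem.Int.toChars
  rw [if_neg (by omega)]
  simp [pvToDigits_length h]

lemma pvStrLen_toStr_pos {x : Int} (h : 0 < x) :
    PySem.Str.len (PySem.Int.toStr x) = (pvCountDigits x.toNat : Int) := by
  have hx : x = (x.toNat : Int) := by omega
  rw [hx]
  exact pvStrLen_toStr_natCast (by omega)

-- the main bridge: digit count of the running max = running max of the digit counts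
-- of the positive elements (as produced by B's filter-and-map)
lemma pvBridge (T : List Int) : ∀ a : Int, 0 ≤ a →
    (pvCountDigits (T.foldl max a).toNat : Int) =
      ((T.filter (fun x => decide (x > 0))).map
        (fun x => PySem.Str.len (PySem.Int.toStr x))).foldl max (pvCountDigits a.toNat : Int) := by
  induction T with
  | nil => intro a _; simp
  | cons x t ih =>
    intro a ha
    by_cases hx : 0 < x
    · have hfilt : (x :: t).filter (fun x => decide (x > 0)) =
          x :: t.filter (fun x => decide (x > 0)) := by
        simp [hx]
      rw [hfilt]
      simp only [List.map_cons, List.foldl_cons, List.foldl_cons]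
      rw [ih (max a x) (by omega), pvStrLen_toStr_pos hx]
      have htn : (max a x).toNat = max a.toNat x.toNat := by omega
      rw [htn, pvCountDigits_max]
      push_cast
      rfl
    · have hfilt : (x :: t).filter (fun x => decide (x > 0)) =
          t.filter (fun x => decide (x > 0)) := by
        simp [hx]
      rw [hfilt]
      simp only [List.foldl_cons]
      have : max a x = a := by omega
      rw [this, ih a ha]

-- maxD with identity key and default 0 over a list of elements ≥ 1 is the running max from 0
lemma pvMaxD_ones (lens : List Int) (h : ∀ l ∈ lens, 1 ≤ l) :
    PySem.List.maxD lens (fun y => y) 0 = lens.foldl max 0 := by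
  cases lens with
  | nil => simp [PySem.List.maxD, PySem.List.max?]
  | cons L rest =>
    unfold PySem.List.maxD
    rw [PySem.List.max?_id_cons, Option.getD_some]
    simp only [List.foldl_cons]
    have hL : max (0 : Int) L = L := by
      have := h L (by simp)
      omega
    rw [hL]

-- ===== VERDICT =====
theorem getMaxLengh_spec : Claim_equal_getMaxLengh := by
  intro T _
  unfold Spec_getMaxLengh getMaxLengh getMaxLengh_alt
  have hfun : (fun (m i : Int) => if i > m then i else m) = max := by
    funext m i; split <;> omega
  rw [hfun]
  have hlens : ∀ l ∈ (T.filter (fun x => decide (x > 0))).map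
      (fun x => PySem.Str.len (PySem.Int.toStr x)), 1 ≤ l := by
    intro l hl
    obtain ⟨x, hx, rfl⟩ := List.mem_map.mp hl
    have hxpos : 0 < x := by
      have := List.of_mem_filter hx
      simpa using this
    rw [pvStrLen_toStr_pos hxpos]
    exact_mod_cast pvCountDigits_pos_ge (by omega)
  have hb := pvBridge T 0 le_rfl
  simp only [Int.toNat_zero, pvCountDigits_zero, Nat.cast_zero] at hb
  rw [pvMaxD_ones _ hlens, ← hb]
  have hge : (0 : Int) ≤ T.foldl max 0 := (PySem.List.le_foldl_max T 0).1
  have hcast : T.foldl max 0 = ((T.foldl max 0).toNat : Int) := by omega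
  rw [hcast, pvDigitLoop_natCast]
  simp
  congr 1
  omega
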